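-- pv_equiv track=rewrite | github.com/yumjw/algorithm-programmers | Level 1/(2101-04)모의고사.py | solution_R
-- ===== SOURCE A (Python) =====
-- from itertools import cycle
--
-- def solution_R(answers):
--     giveups = [
--         cycle([1,2,3,4,5]),
--         cycle([2,1,2,3,2,4,2,5]),
--         cycle([3,3,1,1,2,2,4,4,5,5]),
--     ]
--     scores = [0, 0, 0]
--     for num in answers:
--         for i in range(3):
--             if next(giveups[i]) == num:
--                 scores[i] += 1
--     highest = max(scores)
--
--     return [i + 1 for i, v in enumerate(scores) if v == highest]
-- ===== SOURCE B (Python) =====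
-- def solution_R(answers):
--     # All three guess patterns repeat with period dividing 40 (lcm of 5, 8, 10),
--     # so a histogram of answers keyed by (position mod 40, value), built in one
--     # pass, determines every score: each player's score is a 40-term lookup sum.
--     PERIOD = 40
--     freq = {}
--     for j, a in enumerate(answers):
--         key = (j % PERIOD, a)
--         freq[key] = freq.get(key, 0) + 1
--     patterns = [
--         [1, 2, 3, 4, 5],
--         [2, 1, 2, 3, 2, 4, 2, 5],
--         [3, 3, 1, 1, 2, 2, 4, 4, 5, 5],
--     ]
--     scores = [sum(freq.get((r, p[r % len(p)]), 0) for r in range(PERIOD))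
--               for p in patterns]
--     best = max(scores)
--     return [i + 1 for i in range(3) if scores[i] == best]
-- ===== Notes on version B (the rewrite author's own statement) =====
-- stated objective: alternative
-- what changed: A advances three cyclic generators in lockstep, comparing each answer against all three players as it goes; B first builds a single frequency dictionary keyed by (position mod 40, answer) in one pass (40 = lcm of the pattern periods), then computes each player's score as a 40-term dictionary-lookup sum, so the patterns are never walked alongside the answers.
import Mathlib
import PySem

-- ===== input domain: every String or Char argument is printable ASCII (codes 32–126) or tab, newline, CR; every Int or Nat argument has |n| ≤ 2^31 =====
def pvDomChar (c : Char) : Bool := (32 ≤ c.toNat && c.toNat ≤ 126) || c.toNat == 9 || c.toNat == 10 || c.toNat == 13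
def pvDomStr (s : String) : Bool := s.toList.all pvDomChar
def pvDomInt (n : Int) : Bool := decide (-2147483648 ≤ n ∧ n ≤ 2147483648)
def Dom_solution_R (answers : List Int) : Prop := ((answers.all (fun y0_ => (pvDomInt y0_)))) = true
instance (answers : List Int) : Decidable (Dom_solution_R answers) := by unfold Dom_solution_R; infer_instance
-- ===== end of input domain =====

-- B replaces A's lockstep walk of three cyclic generators by a histogram: one pass builds a
-- dict keyed by (position mod 40, answer) (40 = lcm of the pattern periods), then each
-- player's score is a 40-term lookup sum. Same asymptotic cost, different organisation.

-- ===== PORT A =====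
-- the three cycled sequences (itertools.cycle ported as modular indexing into the list)
def pA1 : List Int := [1, 2, 3, 4, 5]
def pA2 : List Int := [2, 1, 2, 3, 2, 4, 2, 5]
def pA3 : List Int := [3, 3, 1, 1, 2, 2, 4, 4, 5, 5]

-- one iteration of A's outer loop: the inner 'for i in range(3)' unrolled over the
-- three generators; the last component counts the next() calls made on each cycle so far
def stepA (st : Int × Int × Int × Nat) (num : Int) : Int × Int × Int × Nat :=
  (st.1 + (if pA1.getD (st.2.2.2 % pA1.length) 0 = num then 1 else 0),
   st.2.1 + (if pA2.getD (st.2.2.2 % pA2.length) 0 = num then 1 else 0),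
   st.2.2.1 + (if pA3.getD (st.2.2.2 % pA3.length) 0 = num then 1 else 0),
   st.2.2.2 + 1)

def solution_R (answers : List Int) : List Int :=
  let st := answers.foldl stepA (0, 0, 0, 0)
  -- max(scores); the list is nonempty so Python's max never raises
  let highest := (PySem.List.max? [st.1, st.2.1, st.2.2.1] (fun y => y)).getD 0
  ((PySem.List.enumerate [st.1, st.2.1, st.2.2.1] 0).filter
      (fun x => x.2 == highest)).map (fun x => x.1 + 1)

-- ===== PORT B =====
def patternsB : List (List Int) := [[1, 2, 3, 4, 5], [2, 1, 2, 3, 2, 4, 2, 5], [3, 3, 1, 1, 2, 2, 4, 4, 5, 5]]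

-- key = (j % PERIOD, a)
def keyB (ja : Int × Int) : Int × Int := (PySem.Int.mod ja.1 40, ja.2)

def solution_R_alt (answers : List Int) : List Int :=
  -- for j, a in enumerate(answers): freq[key] = freq.get(key, 0) + 1
  let freq := (PySem.List.enumerate answers 0).foldl
      (fun d ja => d.insert (keyB ja) (d.getD (keyB ja) 0 + 1))
      (PySem.Dict.empty : PySem.Dict (Int × Int) Int)
  -- scores = [sum(freq.get((r, p[r % len(p)]), 0) for r in range(PERIOD)) for p in patterns]
  let scores := patternsB.map (fun p =>
      ((PySem.List.pyRange 0 40 1).map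
        (fun r => freq.getD (r, PySem.List.pyGetD p (PySem.Int.mod r (p.length : Int)) 0) 0)).sum)
  let best := (PySem.List.max? scores (fun y => y)).getD 0
  ((PySem.List.pyRange 0 3 1).filter
      (fun i => PySem.List.pyGetD scores i 0 == best)).map (fun i => i + 1)

-- ===== PRECONDITION & SPEC =====
def Spec_solution_R (answers : List Int) (out : List Int) : Prop := out = solution_R_alt answers
instance (answers : List Int) (out : List Int) : Decidable (Spec_solution_R answers out) := by unfold Spec_solution_R; infer_instance

-- ===== CLAIM (what is proved, stated in full; the proofs are below) =====
def Claim_equal_solution_R : Prop := ∀ (answers : List Int), Dom_solution_R answers → Spec_solution_R answers (solution_R answers)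

-- ===== LEMMAS AND PROOFS =====

-- the direct per-player score both sides are reduced to
def dscore (p : List Int) : Nat → List Int → Int
  | _, [] => 0
  | j, a :: rest => (if p.getD (j % p.length) 0 = a then 1 else 0) + dscore p (j + 1) rest

lemma foldA_eq (answers : List Int) : ∀ (s1 s2 s3 : Int) (j : Nat),
    answers.foldl stepA (s1, s2, s3, j) =
      (s1 + dscore pA1 j answers, s2 + dscore pA2 j answers,
       s3 + dscore pA3 j answers, j + answers.length) := by
  induction answers with
  | nil => intro s1 s2 s3 j; simp [dscore]
  | cons a rest ih =>
      intro s1 s2 s3 j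
      simp only [List.foldl_cons, stepA, ih, dscore, List.length_cons]
      refine Prod.ext ?_ (Prod.ext ?_ (Prod.ext ?_ ?_)) <;> simp <;> ring

lemma sum_range_single (w : Nat → Int) : ∀ (n m : Nat), m < n →
    ((List.range n).map (fun r => if m = r then w r else 0)).sum = w m := by
  intro n
  induction n with
  | zero => intro m hm; omega
  | succ n ih =>
      intro m hm
      rw [List.range_succ, List.map_append, List.sum_append]
      by_cases h : m = n
      · subst h
        have hz : ((List.range m).map (fun r => if m = r then w r else 0)).sum = 0 := by
          apply List.sum_eq_zero
          intro x hx
          obtain ⟨r, hr, rfl⟩ := List.mem_map.mp hx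
          have : m ≠ r := by have := List.mem_range.mp hr; omega
          simp [this]
        simp [hz]
      · have hm' : m < n := by omega
        rw [ih m hm']
        simp [h]

-- the histogram lookup sum for pattern p equals the direct score
lemma bsum_eq (p : List Int) (hd : p.length ∣ 40) (answers : List Int) :
    ∀ (j : Nat),
    ((List.range 40).map (fun r =>
        ((((PySem.List.enumerate answers (j : Int)).map keyB).count
            (((r : Nat) : Int), PySem.List.pyGetD p (PySem.Int.mod (r : Int) (p.length : Int)) 0) : Nat) : Int))).sum
      = dscore p j answers := by
  induction answers with
  | nil => intro j; simp [PySem.List.enumerate, dscore]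
  | cons a rest ih =>
      intro j
      have hen : PySem.List.enumerate (a :: rest) (j : Int)
          = ((j : Int), a) :: PySem.List.enumerate rest ((j : Int) + 1) := rfl
      have hcast : ((j : Int) + 1) = (((j + 1 : Nat)) : Int) := by push_cast; ring
      rw [hen, hcast, List.map_cons]
      have hkey : keyB (((j : Nat) : Int), a) = ((((j % 40 : Nat)) : Int), a) := by
        simp [keyB]
      rw [hkey]
      have hsplit : ∀ (r : Nat),
          ((((((j % 40 : Nat)) : Int), a) :: (PySem.List.enumerate rest ((j + 1 : Nat) : Int)).map keyB).count
              (((r : Nat) : Int), PySem.List.pyGetD p (PySem.Int.mod (r : Int) (p.length : Int)) 0) : Int)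
          = (if (j % 40 : Nat) = r then
               (if PySem.List.pyGetD p (PySem.Int.mod (r : Int) (p.length : Int)) 0 = a then (1:Int) else 0)
             else 0)
            + (((PySem.List.enumerate rest ((j + 1 : Nat) : Int)).map keyB).count
                (((r : Nat) : Int), PySem.List.pyGetD p (PySem.Int.mod (r : Int) (p.length : Int)) 0) : Int) := by
        intro r
        rw [List.count_cons, Nat.cast_add, add_comm]
        congr 1
        rcases eq_or_ne (j % 40) r with h1 | h1
        · subst h1
          simp only [beq_iff_eq, Prod.mk.injEq, Nat.cast_ite, Nat.cast_one, Nat.cast_zero]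
          simp only [true_and, if_true]
          split_ifs <;>
            first
              | rfl
              | (rename_i u v; exact absurd u.symm v)
              | (rename_i u v; exact absurd v.symm u)
        · have hcast2 : (((j % 40 : Nat)) : Int) = (j : Int) % 40 := by push_cast; ring
          have hne : ((j : Int) % 40) ≠ ((r : Nat) : Int) := by
            rw [← hcast2]; exact_mod_cast h1
          simp [h1, hne]
      simp only [hsplit]
      rw [PySem.List.sum_map_add_int, ih (j + 1)]
      have hm : j % 40 < 40 := Nat.mod_lt _ (by omega)
      rw [sum_range_single (fun r => if PySem.List.pyGetD p (PySem.Int.mod (r : Int) (p.length : Int)) 0 = a then (1:Int) else 0) 40 (j % 40) hm]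
      have hmod : PySem.Int.mod (((j % 40 : Nat)) : Int) ((p.length : Nat) : Int) = (((j % p.length : Nat)) : Int) := by
        rw [PySem.Int.mod_natCast, Nat.mod_mod_of_dvd j hd]
      rw [hmod, PySem.List.pyGetD_natCast]
      simp [dscore, eq_comm]

-- ===== VERDICT (by name: the statement is the Claim_ definition above) =====
theorem solution_R_spec : Claim_equal_solution_R := by
  intro answers _
  unfold Spec_solution_R solution_R solution_R_alt
  simp only [foldA_eq, zero_add]
  have hrange : PySem.List.pyRange 0 40 1 = (List.range 40).map (fun k : Nat => (k : Int)) := by decide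
  have hscore : ∀ (p : List Int), p.length ∣ 40 →
      ((PySem.List.pyRange 0 40 1).map
        (fun r => ((PySem.List.enumerate answers 0).foldl
            (fun d ja => d.insert (keyB ja) (d.getD (keyB ja) 0 + 1))
            (PySem.Dict.empty : PySem.Dict (Int × Int) Int)).getD
              (r, PySem.List.pyGetD p (PySem.Int.mod r (p.length : Int)) 0) 0)).sum
      = dscore p 0 answers := by
    intro p hd
    have hfold : (PySem.List.enumerate answers 0).foldl
        (fun d ja => d.insert (keyB ja) (d.getD (keyB ja) 0 + 1))
        (PySem.Dict.empty : PySem.Dict (Int × Int) Int)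
      = ((PySem.List.enumerate answers 0).map keyB).foldl
          (fun d x => d.insert x (d.getD x 0 + 1))
          (PySem.Dict.empty : PySem.Dict (Int × Int) Int) := by
      rw [List.foldl_map]
    have hb := bsum_eq p hd answers 0
    simp only [Nat.cast_zero] at hb
    rw [hrange, List.map_map, ← hb]
    apply congrArg List.sum
    apply List.map_congr_left
    intro r _
    simp only [Function.comp, hfold, PySem.Dict.getD_foldl_insert_add_one, PySem.Dict.getD_empty,
      zero_add]
  simp only [patternsB, List.map_cons, List.map_nil]
  rw [hscore [1,2,3,4,5] (by decide),
      hscore [2,1,2,3,2,4,2,5] (by decide),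
      hscore [3,3,1,1,2,2,4,4,5,5] (by decide)]
  have h1 : ([1,2,3,4,5] : List Int) = pA1 := rfl
  have h2 : ([2,1,2,3,2,4,2,5] : List Int) = pA2 := rfl
  have h3 : ([3,3,1,1,2,2,4,4,5,5] : List Int) = pA3 := rfl
  rw [h1, h2, h3]
  set b1 := dscore pA1 0 answers
  set b2 := dscore pA2 0 answers
  set b3 := dscore pA3 0 answers
  set m := (PySem.List.max? [b1, b2, b3] (fun y => y)).getD 0 with hm
  have hr : PySem.List.pyRange 0 3 1 = [0, 1, 2] := by decide
  simp only [hr, PySem.List.enumerate]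
  cases hb1 : b1 == m <;> cases hb2 : b2 == m <;> cases hb3 : b3 == m <;>
    simp [List.filter, hb1, hb2, hb3, PySem.List.pyGetD, PySem.List.pyGet?, PySem.List.pyIdx?]
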